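-- pv_equiv track=rewrite | github.com/Altarax/CubeSat | sources/scripts/vhdl_parser.py | parse_vhdl_section
-- ===== SOURCE A (Python) =====
-- def parse_vhdl_section(content, start_keyword, end_keyword) -> str:
--     """
--     Parses a VHDL section within the content based on the start and end keywords.
--
--     Args:
--         content (list): List of lines containing the VHDL content.
--         start_keyword (str): Start keyword marking the beginning of the section.
--         end_keyword (str): End keyword marking the end of the section.
--
--     Returns:
--         str: Parsed content section.
--
--     """
--     start_index = None
--     end_index = None
--
--     start_found = False
--     end_found = False
--
--     for i, line in enumerate(content):
--         if not start_found and line.strip().startswith(start_keyword):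
--             start_index = i + 1
--             start_found = True
--         elif start_found and line.strip().startswith(end_keyword):
--             end_index = i
--             end_found = True
--             break
--
--     if start_found and end_found:
--         parsed_content = content[start_index:end_index]
--         return parsed_content
--     else:
--         return None
-- ===== SOURCE B (Python) =====
-- def parse_vhdl_section(content, start_keyword, end_keyword) -> str:
--     """Consume a single shared iterator: an outer loop skips lines up to the
--     start marker, then an inner loop over the same iterator accumulates the
--     section line by line until the end marker.  No indices, no slicing."""
--     it = iter(content)
--     for line in it:
--         if line.strip().startswith(start_keyword):
--             section = []
--             for line in it:
--                 if line.strip().startswith(end_keyword):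
--                     return section
--                 section.append(line)
--             return None
--     return None
-- ===== Notes on version B (the rewrite author's own statement) =====
-- stated objective: simpler
-- what changed: Replaced the four-variable state machine that records indices and slices the list afterwards by an index-free nested iteration over one shared iterator that accumulates the section lines directly.
import Mathlib
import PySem

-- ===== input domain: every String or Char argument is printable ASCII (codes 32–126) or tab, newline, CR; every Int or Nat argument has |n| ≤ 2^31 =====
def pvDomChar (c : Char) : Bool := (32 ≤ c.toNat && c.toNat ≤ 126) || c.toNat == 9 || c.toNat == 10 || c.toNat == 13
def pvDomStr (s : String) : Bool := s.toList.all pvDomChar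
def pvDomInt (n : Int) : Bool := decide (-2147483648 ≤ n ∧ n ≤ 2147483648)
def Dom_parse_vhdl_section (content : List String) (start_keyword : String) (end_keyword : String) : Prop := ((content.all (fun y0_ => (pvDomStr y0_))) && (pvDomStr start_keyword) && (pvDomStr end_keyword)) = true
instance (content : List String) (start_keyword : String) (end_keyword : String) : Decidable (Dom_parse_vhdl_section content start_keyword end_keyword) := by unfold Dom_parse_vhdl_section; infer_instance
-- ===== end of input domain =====

-- B replaces A's index-recording state machine plus final slice by an index-free nested iteration over one shared iterator that accumulates the section lines directly; objective: simpler.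


-- ===== PORT A =====
-- A's for-loop over enumerate(content) with the four state variables
-- (start_found, start_index, end_found, end_index); 'break' = returning the state.
def pvLoopA (start_keyword end_keyword : String) :
    List String → Nat → Bool → Option Nat → (Bool × Option Nat × Bool × Option Nat)
  | [], _, start_found, start_index => (start_found, start_index, false, none)
  | line :: rest, i, start_found, start_index =>
    if !start_found && PySem.Str.startswith (PySem.Str.strip line) start_keyword then
      pvLoopA start_keyword end_keyword rest (i + 1) true (some (i + 1))
    else if start_found && PySem.Str.startswith (PySem.Str.strip line) end_keyword then
      (start_found, start_index, true, some i)
    else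
      pvLoopA start_keyword end_keyword rest (i + 1) start_found start_index

def parse_vhdl_section (content : List String) (start_keyword : String) (end_keyword : String) : Option (List String) :=
  match pvLoopA start_keyword end_keyword content 0 false none with
  | (start_found, start_index, end_found, end_index) =>
    if start_found && end_found then
      some (PySem.List.slice content (some ((start_index.getD 0 : Nat) : Int)) (some ((end_index.getD 0 : Nat) : Int)))
    else
      none

-- ===== PORT B =====
-- B's inner loop: consume the rest of the iterator, appending lines to 'section'
-- until a line starting with the end keyword is met ('return section'); exhausting
-- the iterator is 'return None'.
def pvCollectB (end_keyword : String) : List String → List String → Option (List String)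
  | [], _ => none
  | line :: rest, section_ =>
    if PySem.Str.startswith (PySem.Str.strip line) end_keyword then some section_
    else pvCollectB end_keyword rest (section_ ++ [line])

-- B's outer loop: consume the iterator until the start keyword is met, then hand
-- the remaining iterator to the inner loop with an empty accumulator.
def pvSkipB (start_keyword end_keyword : String) : List String → Option (List String)
  | [] => none
  | line :: rest =>
    if PySem.Str.startswith (PySem.Str.strip line) start_keyword then
      pvCollectB end_keyword rest []
    else pvSkipB start_keyword end_keyword rest

def parse_vhdl_section_alt (content : List String) (start_keyword : String) (end_keyword : String) : Option (List String) :=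
  pvSkipB start_keyword end_keyword content

-- ===== PRECONDITION & SPEC =====
def Spec_parse_vhdl_section (content : List String) (start_keyword : String) (end_keyword : String) (out : Option (List String)) : Prop := out = parse_vhdl_section_alt content start_keyword end_keyword
instance (content : List String) (start_keyword : String) (end_keyword : String) (out : Option (List String)) : Decidable (Spec_parse_vhdl_section content start_keyword end_keyword out) := by unfold Spec_parse_vhdl_section; infer_instance

-- ===== CLAIM (what is proved, stated in full; the proofs are below) =====
def Claim_equal_parse_vhdl_section : Prop := ∀ (content : List String) (start_keyword : String) (end_keyword : String), Dom_parse_vhdl_section content start_keyword end_keyword → Spec_parse_vhdl_section content start_keyword end_keyword (parse_vhdl_section content start_keyword end_keyword)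

-- ===== LEMMAS AND PROOFS =====

-- B's inner loop characterised by the position of the first end-marker line.
lemma pvCollectB_eq (ek : String) (ls acc : List String) :
    pvCollectB ek ls acc =
      (ls.findIdx? (fun line => PySem.Chars.startswith (PySem.Chars.strip line.toList) ek.toList)).map
        (fun j => acc ++ ls.take j) := by
  induction ls generalizing acc with
  | nil => simp [pvCollectB]
  | cons line rest ih =>
    by_cases h : PySem.Chars.startswith (PySem.Chars.strip line.toList) ek.toList = true
    · simp [pvCollectB, h, List.findIdx?_cons]
    · simp [pvCollectB, h, List.findIdx?_cons, ih]
      cases rest.findIdx? (fun line => PySem.Chars.startswith (PySem.Chars.strip line.toList) ek.toList) with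
      | none => simp
      | some j => simp

-- After the start marker was found, A's loop is exactly the search for the end marker.
lemma pvLoopA_found (sk ek : String) (ls : List String) (i si : Nat) :
    pvLoopA sk ek ls i true (some si) =
      match ls.findIdx? (fun line => PySem.Chars.startswith (PySem.Chars.strip line.toList) ek.toList) with
      | none => (true, some si, false, none)
      | some j => (true, some si, true, some (i + j)) := by
  induction ls generalizing i with
  | nil => simp [pvLoopA]
  | cons line rest ih =>
    by_cases h : PySem.Chars.startswith (PySem.Chars.strip line.toList) ek.toList = true
    · simp [pvLoopA, h, List.findIdx?_cons]
    · simp [pvLoopA, h, List.findIdx?_cons, ih (i + 1)]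
      cases rest.findIdx? (fun line => PySem.Chars.startswith (PySem.Chars.strip line.toList) ek.toList) with
      | none => simp
      | some j => simp; omega

-- Main agreement lemma: A's loop started in the not-found state, followed by A's
-- final test-and-slice, returns what B's nested loops return.
lemma pvAgree (sk ek : String) (content : List String) (ls : List String) (i : Nat)
    (hls : ls = content.drop i) :
    (match pvLoopA sk ek ls i false none with
     | (start_found, start_index, end_found, end_index) =>
       if start_found && end_found then
         some (PySem.List.slice content (some ((start_index.getD 0 : Nat) : Int)) (some ((end_index.getD 0 : Nat) : Int)))
       else none) =
    pvSkipB sk ek ls := by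
  induction ls generalizing i with
  | nil => simp [pvLoopA, pvSkipB]
  | cons line rest ih =>
    have hrest : rest = content.drop (i + 1) := by
      have := congrArg (List.drop 1) hls
      simpa [List.drop_drop, Nat.add_comm] using this
    by_cases h : PySem.Chars.startswith (PySem.Chars.strip line.toList) sk.toList = true
    · -- start marker found at index i: A switches to end-search, B to the collect loop
      simp only [pvLoopA, pvSkipB, PySem.Str.startswith_eq, PySem.Str.toList_strip, h,
        Bool.not_false, Bool.true_and, if_true]
      rw [pvLoopA_found sk ek rest (i + 1) (i + 1), pvCollectB_eq]
      cases hf : rest.findIdx? (fun line => PySem.Chars.startswith (PySem.Chars.strip line.toList) ek.toList) with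
      | none => simp
      | some j =>
        simp only [Option.map_some, Option.getD_some, Bool.and_self, if_true,
          PySem.List.slice_natCast]
        rw [← hrest]
        simp
    · simp only [pvLoopA, pvSkipB, PySem.Str.startswith_eq, PySem.Str.toList_strip, h,
        Bool.not_false, Bool.true_and, Bool.false_and]
      simpa using ih (i + 1) hrest

-- ===== VERDICT (by name: the statement is the Claim_ definition above) =====
theorem parse_vhdl_section_spec : Claim_equal_parse_vhdl_section := by
  intro content sk ek _
  show parse_vhdl_section content sk ek = parse_vhdl_section_alt content sk ek
  unfold parse_vhdl_section parse_vhdl_section_alt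
  exact pvAgree sk ek content content 0 (by simp)
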